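-- pv_equiv track=rewrite | github.com/NenausnikovKV/personal_library | NLP/processing_plan_text.py | _line_break_processing
-- ===== SOURCE A (Python) =====
-- def _line_break_processing(text):
--     # определение переноса строки, как конец предложения по трем символам
--     #  после переноса строки проверяем наличие верхнего решистра и его отсутствие во втором символе
--     i = 3
--     while i < text.__len__():
--         if all([text[i-2] == "\n", text[i-1].isupper(), not text[i].isupper()]):
--             text1 = text[:i - 2]
--             text2 = text[i-1:]
--             text = text[:i - 2] + ". " + text[i-1:]
--         i+=1
--     #  удаление переносов не удовлетворивших условию
--     text = text.replace("\n", " ")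
--     return text
-- ===== SOURCE B (Python) =====
-- def _line_break_processing(text):
--     # Rebuild from newline-split segments, choosing each boundary separator once.
--     segs = text.split('\n')
--     parts = [segs[0]]
--     pos = len(segs[0])  # original index of the newline ending this segment
--     for k in range(1, len(segs)):
--         nxt = segs[k]
--         if pos >= 1 and nxt and nxt[0].isupper():
--             if len(nxt) >= 2:
--                 dot = not nxt[1].isupper()
--             else:
--                 # the char two after the newline is the next '\n' (if any)
--                 dot = k + 1 < len(segs)
--         else:
--             dot = False
--         parts.append('. ' if dot else ' ')
--         parts.append(nxt)
--         pos += 1 + len(nxt)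
--     return ''.join(parts)
-- ===== Notes on version B (the rewrite author's own statement) =====
-- stated objective: faster
-- what changed: A repeatedly rebuilds the whole string by slicing at every matched newline while rescanning index by index; B splits the text on newlines once and joins the segments back in a single pass, choosing period-plus-space or plain space per boundary from two look-ahead characters reconstructed from the following segment.
import Mathlib
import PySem

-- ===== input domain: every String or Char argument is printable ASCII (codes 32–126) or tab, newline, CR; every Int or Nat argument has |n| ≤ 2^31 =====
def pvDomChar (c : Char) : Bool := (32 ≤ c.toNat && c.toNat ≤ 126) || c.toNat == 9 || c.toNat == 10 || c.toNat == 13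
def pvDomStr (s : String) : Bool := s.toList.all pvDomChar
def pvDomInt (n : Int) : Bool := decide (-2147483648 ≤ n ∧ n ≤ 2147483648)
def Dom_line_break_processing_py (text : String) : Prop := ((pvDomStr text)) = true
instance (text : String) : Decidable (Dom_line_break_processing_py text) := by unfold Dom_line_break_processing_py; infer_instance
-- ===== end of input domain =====

-- B replaces A's index-shifting while loop (which rebuilds the whole string by slicing at every
-- matched newline) with one split('\n') and a single join choosing each boundary separator once.

-- ===== PORT A =====
-- the loop condition all([text[i-2]=="\n", text[i-1].isupper(), not text[i].isupper()])
def pvCondA (t : List Char) (i : Nat) : Bool :=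
  (PySem.List.pyGetD t ((i : Int) - 2) ' ' == '\n')
    && PySem.Chars.isupper (PySem.List.pyGetD t ((i : Int) - 1) ' ')
    && !PySem.Chars.isupper (PySem.List.pyGetD t (i : Int) ' ')

-- text[:i-2] + ". " + text[i-1:]
def pvReplA (t : List Char) (i : Nat) : List Char :=
  PySem.List.slice t none (some ((i : Int) - 2)) ++ ('.' :: ' ' :: PySem.List.slice t (some ((i : Int) - 1)) none)

-- the while loop; fuel = len(text) + count('\n') bounds the iteration count (each step either
-- advances i by one, or also consumes one '\n' while growing the text by one) — a totality
-- guard only, never reached on the actual call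
def pvLoopA (fuel : Nat) (t : List Char) (i : Nat) : List Char :=
  match fuel with
  | 0 => t
  | fuel + 1 =>
    if i < t.length then
      if pvCondA t i then pvLoopA fuel (pvReplA t i) (i + 1)
      else pvLoopA fuel t (i + 1)
    else t

def line_break_processing_py (text : String) : String :=
  String.ofList (PySem.Chars.replace
    (pvLoopA (text.toList.length + text.toList.count '\n') text.toList 3) ['\n'] [' '])

-- ===== PORT B =====
-- dot decision for the newline at original index pos, followed by segment nxt;
-- `more` = "another segment follows nxt" (Source B's `k + 1 < len(segs)`)
def pvDotB (pos : Nat) (nxt : List Char) (more : Bool) : Bool :=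
  if decide (1 ≤ pos) && !nxt.isEmpty && PySem.Chars.isupper (nxt.getD 0 ' ') then
    if 2 ≤ nxt.length then !PySem.Chars.isupper (nxt.getD 1 ' ') else more
  else false

-- Source B's for-loop over segs[1:], pos = original index of the newline before nxt
def pvLoopB (pos : Nat) (segs : List (List Char)) : List (List Char) :=
  match segs with
  | [] => []
  | nxt :: rest =>
      (if pvDotB pos nxt (!rest.isEmpty) then ['.', ' '] else [' ']) :: nxt ::
        pvLoopB (pos + 1 + nxt.length) rest

def line_break_processing_py_alt (text : String) : String :=
  let segs := PySem.Chars.splitOn text.toList ['\n']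
  String.ofList (PySem.Chars.join [] (segs.headD [] :: pvLoopB (segs.headD []).length segs.tail))

-- ===== PRECONDITION & SPEC =====
def Spec_line_break_processing_py (text : String) (out : String) : Prop := out = line_break_processing_py_alt text
instance (text : String) (out : String) : Decidable (Spec_line_break_processing_py text out) := by unfold Spec_line_break_processing_py; infer_instance

-- ===== CLAIM (what is proved, stated in full; the proofs are below) =====
def Claim_equal_line_break_processing_py : Prop := ∀ (text : String), Dom_line_break_processing_py text → Spec_line_break_processing_py text (line_break_processing_py text)

-- ===== LEMMAS AND PROOFS =====

-- common characterisation: per original index q, what the processed text contributes,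
-- before the final '\n' → ' ' replacement
def pvNl2Sp (c : Char) : Char := if c = '\n' then ' ' else c

def pvOut (s : List Char) (q : Nat) : List Char :=
  if s.getD q ' ' = '\n' ∧ 1 ≤ q ∧ q + 2 < s.length
      ∧ PySem.Chars.isupper (s.getD (q + 1) ' ') = true
      ∧ PySem.Chars.isupper (s.getD (q + 2) ' ') = false
  then ['.', ' '] else [s.getD q ' ']

def pvProc (s : List Char) (p : Nat) : List Char := (List.range p).flatMap (pvOut s)

lemma pvReplA_eq (t : List Char) (i : Nat) (h : 2 ≤ i) :
    pvReplA t i = t.take (i - 2) ++ '.' :: ' ' :: t.drop (i - 1) := by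
  unfold pvReplA
  have h2 : ((i : Int) - 2) = ((i - 2 : Nat) : Int) := by omega
  have h1 : ((i : Int) - 1) = ((i - 1 : Nat) : Int) := by omega
  rw [h2, h1, PySem.List.slice_to_natCast, PySem.List.slice_from_natCast]

lemma pvCondA_eq (t : List Char) (i : Nat) (h : 2 ≤ i) :
    pvCondA t i = ((t.getD (i - 2) ' ' == '\n')
      && PySem.Chars.isupper (t.getD (i - 1) ' ')
      && !PySem.Chars.isupper (t.getD i ' ')) := by
  unfold pvCondA
  have h2 : ((i : Int) - 2) = ((i - 2 : Nat) : Int) := by omega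
  have h1 : ((i : Int) - 1) = ((i - 1 : Nat) : Int) := by omega
  rw [h2, h1]
  simp [PySem.List.pyGetD_natCast]

-- generic indexing helpers
lemma pvGetD_drop (s : List Char) (k j : Nat) (d : Char) :
    (s.drop k).getD j d = s.getD (k + j) d := by
  simp [List.getD_eq_getElem?_getD, List.getElem?_drop]

lemma pvGetD_append_len (a b : List Char) (j : Nat) (d : Char) :
    (a ++ b).getD (a.length + j) d = b.getD j d := by
  simp [List.getD_eq_getElem?_getD, List.getElem?_append_right (by omega : a.length ≤ a.length + j)]

lemma pvMap_getD_range' (s : List Char) : ∀ (k p : Nat), p + k ≤ s.length →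
    (List.range' p k).map (fun q => s.getD q ' ') = (s.drop p).take k := by
  intro k
  induction k with
  | zero => simp
  | succ k ih =>
    intro p hpk
    rw [List.range'_succ, List.map_cons, ih (p + 1) (by omega)]
    rw [List.drop_eq_getElem_cons (by omega : p < s.length), List.take_succ_cons]
    rw [List.getD_eq_getElem?_getD, List.getElem?_eq_getElem (by omega : p < s.length)]
    rfl

lemma pvFlatMap_out_eq_map (s : List Char) {k p : Nat}
    (h : ∀ q ∈ List.range' p k, pvOut s q = [s.getD q ' ']) :
    (List.range' p k).flatMap (pvOut s) = (List.range' p k).map (fun q => s.getD q ' ') := by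
  induction k generalizing p with
  | zero => simp
  | succ k ih =>
    rw [List.range'_succ] at h ⊢
    rw [List.flatMap_cons, List.map_cons, h p (by simp), ih (fun q hq => h q (by simp [hq]))]
    rfl

-- the trivial contribution of a position whose guard fails
lemma pvOut_single (s : List Char) (q : Nat)
    (h : ¬ (s.getD q ' ' = '\n' ∧ 1 ≤ q ∧ q + 2 < s.length
      ∧ PySem.Chars.isupper (s.getD (q + 1) ' ') = true
      ∧ PySem.Chars.isupper (s.getD (q + 2) ' ') = false)) :
    pvOut s q = [s.getD q ' '] := by
  unfold pvOut; rw [if_neg h]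

lemma pvProc_split (s : List Char) (p n : Nat) (h : p ≤ n) :
    (List.range n).flatMap (pvOut s) = (List.range p).flatMap (pvOut s) ++ (List.range' p (n - p)).flatMap (pvOut s) := by
  rw [← List.flatMap_append, List.range_eq_range', List.range_eq_range']
  have := @List.range'_append 0 p (n - p) 1
  simp only [Nat.one_mul, Nat.zero_add] at this
  rw [this, Nat.add_sub_cancel' h]

lemma pvProc_succ (s : List Char) (p : Nat) :
    pvProc s (p + 1) = pvProc s p ++ pvOut s p := by
  unfold pvProc
  rw [List.range_succ, List.flatMap_append]
  simp

-- the loop's exit state: every remaining position contributes its own character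
lemma pvExit (s : List Char) (p : Nat) (hp : p ≤ s.length) (h : s.length ≤ p + 2) :
    pvProc s p ++ s.drop p = pvProc s s.length := by
  unfold pvProc
  rw [pvProc_split s p s.length hp]
  have hmap : (List.range' p (s.length - p)).flatMap (pvOut s)
      = (List.range' p (s.length - p)).map (fun q => s.getD q ' ') := by
    apply pvFlatMap_out_eq_map
    intro q hq
    rw [List.mem_range'_1] at hq
    exact pvOut_single s q (fun g => by omega)
  rw [hmap, pvMap_getD_range' s (s.length - p) p (by omega)]
  rw [List.take_of_length_le (by simp)]

-- A's loop computes pvProc: induction on the fuel along the scan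
lemma pvLoopA_proc (s : List Char) : ∀ (fuel p : Nat), 1 ≤ p → p ≤ s.length →
    (pvProc s p ++ s.drop p).length + (pvProc s p ++ s.drop p).count '\n'
      ≤ ((pvProc s p).length + 2) + fuel →
    pvLoopA fuel (pvProc s p ++ s.drop p) ((pvProc s p).length + 2) = pvProc s s.length := by
  intro fuel
  induction fuel using Nat.strong_induction_on with
  | _ fuel ih =>
    intro p h1 hp hbud
    have hlen : (pvProc s p ++ s.drop p).length = (pvProc s p).length + (s.length - p) := by
      simp
    cases fuel with
    | zero =>
      have hc0 : (0:Nat) ≤ (pvProc s p ++ s.drop p).count '\n' := Nat.zero_le _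
      exact pvExit s p hp (by omega)
    | succ f =>
      rw [show pvLoopA (f + 1) (pvProc s p ++ s.drop p) ((pvProc s p).length + 2)
          = if (pvProc s p).length + 2 < (pvProc s p ++ s.drop p).length then
              (if pvCondA (pvProc s p ++ s.drop p) ((pvProc s p).length + 2) then
                pvLoopA f (pvReplA (pvProc s p ++ s.drop p) ((pvProc s p).length + 2)) ((pvProc s p).length + 2 + 1)
              else pvLoopA f (pvProc s p ++ s.drop p) ((pvProc s p).length + 2 + 1))
            else (pvProc s p ++ s.drop p) from rfl]
      by_cases hguard : p + 2 < s.length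
      · rw [if_pos (by omega)]
        have hg2 : (2:Nat) ≤ (pvProc s p).length + 2 := by omega
        have hi2 : (pvProc s p).length + 2 - 2 = (pvProc s p).length := by omega
        have hi1 : (pvProc s p).length + 2 - 1 = (pvProc s p).length + 1 := by omega
        have hread : ∀ j : Nat, (pvProc s p ++ s.drop p).getD ((pvProc s p).length + j) ' '
            = s.getD (p + j) ' ' := by
          intro j; rw [pvGetD_append_len, pvGetD_drop]
        have hc := pvCondA_eq (pvProc s p ++ s.drop p) ((pvProc s p).length + 2) hg2
        rw [hi2, hi1] at hc
        have hr0 : (pvProc s p ++ s.drop p).getD (pvProc s p).length ' ' = s.getD p ' ' := by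
          have := hread 0; simpa using this
        rw [hr0, hread 1, hread 2] at hc
        have hdropcons : s.drop p = s.getD p ' ' :: s.drop (p + 1) := by
          rw [List.drop_eq_getElem_cons (by omega : p < s.length)]
          rw [List.getD_eq_getElem?_getD, List.getElem?_eq_getElem (by omega : p < s.length)]
          rfl
        by_cases hcnd : (s.getD p ' ' = '\n' ∧ PySem.Chars.isupper (s.getD (p + 1) ' ') = true
            ∧ PySem.Chars.isupper (s.getD (p + 2) ' ') = false)
        · -- replacement branch
          have hcondT : pvCondA (pvProc s p ++ s.drop p) ((pvProc s p).length + 2) = true := by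
            rw [hc, hcnd.1, hcnd.2.1, hcnd.2.2]; decide
          rw [if_pos hcondT]
          have hout : pvOut s p = ['.', ' '] := by
            unfold pvOut; rw [if_pos ⟨hcnd.1, h1, hguard, hcnd.2.1, hcnd.2.2⟩]
          have hrepl : pvReplA (pvProc s p ++ s.drop p) ((pvProc s p).length + 2)
              = pvProc s (p + 1) ++ s.drop (p + 1) := by
            rw [pvReplA_eq _ _ hg2, hi2, hi1, pvProc_succ, hout]
            rw [List.take_left, List.drop_append]
            simp [List.drop_drop]
          rw [hrepl]
          have hlen1 : (pvProc s (p + 1)).length = (pvProc s p).length + 2 := by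
            rw [pvProc_succ, hout]; simp
          have hlen' : (pvProc s (p + 1) ++ s.drop (p + 1)).length
              = (pvProc s p).length + 2 + (s.length - (p + 1)) := by simp [hlen1]
          -- the rewritten text is one longer but has one newline fewer
          have hcount : (pvProc s (p + 1) ++ s.drop (p + 1)).count '\n' + 1
              = (pvProc s p ++ s.drop p).count '\n' := by
            rw [pvProc_succ, hout]
            conv_rhs => rw [hdropcons]
            rw [hcnd.1]
            simp [List.count_append, List.count_cons]
            omega
          cases f with
          | zero =>
            -- impossible: the budget cannot be exhausted while the guard still holds
            exfalso
            have hge1 : 1 ≤ (s.drop p).count '\n' := by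
              rw [hdropcons, hcnd.1]; simp
            have hsplitc : (pvProc s p ++ s.drop p).count '\n'
                = (pvProc s p).count '\n' + (s.drop p).count '\n' := by
              simp [List.count_append]
            have hld : (s.drop p).length = s.length - p := by simp
            simp only [List.length_append] at hbud
            omega
          | succ f2 =>
            rw [show pvLoopA (f2 + 1) (pvProc s (p + 1) ++ s.drop (p + 1)) ((pvProc s p).length + 2 + 1)
                = if (pvProc s p).length + 2 + 1 < (pvProc s (p + 1) ++ s.drop (p + 1)).length then
                    (if pvCondA (pvProc s (p + 1) ++ s.drop (p + 1)) ((pvProc s p).length + 2 + 1) then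
                      pvLoopA f2 (pvReplA (pvProc s (p + 1) ++ s.drop (p + 1)) ((pvProc s p).length + 2 + 1)) ((pvProc s p).length + 2 + 1 + 1)
                    else pvLoopA f2 (pvProc s (p + 1) ++ s.drop (p + 1)) ((pvProc s p).length + 2 + 1 + 1))
                  else (pvProc s (p + 1) ++ s.drop (p + 1)) from rfl]
            rw [if_pos (by omega)]
            have hcond2 : pvCondA (pvProc s (p + 1) ++ s.drop (p + 1)) ((pvProc s p).length + 2 + 1) = false := by
              rw [pvCondA_eq _ _ (by omega)]
              have he : (pvProc s p).length + 2 + 1 - 2 = (pvProc s p).length + 1 := by omega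
              rw [he]
              have hsp : (pvProc s (p + 1) ++ s.drop (p + 1)).getD ((pvProc s p).length + 1) ' ' = ' ' := by
                rw [pvProc_succ, hout, List.append_assoc]
                have := pvGetD_append_len (pvProc s p) (['.', ' '] ++ s.drop (p + 1)) 1 ' '
                simpa using this
              rw [hsp]
              simp
            rw [if_neg (by rw [hcond2]; simp)]
            rw [show (pvProc s p).length + 2 + 1 + 1 = (pvProc s (p + 1)).length + 2 from by omega]
            exact ih f2 (by omega) (p + 1) (by omega) (by omega)
              (by simp only [List.length_append, List.length_drop] at hbud ⊢; omega)
        · -- no-replacement branch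
          have hcondF : ¬ pvCondA (pvProc s p ++ s.drop p) ((pvProc s p).length + 2) = true := by
            rw [hc]
            simp only [Bool.and_eq_true, beq_iff_eq, Bool.not_eq_true']
            exact fun hh => hcnd ⟨hh.1.1, hh.1.2, hh.2⟩
          rw [if_neg hcondF]
          have hout : pvOut s p = [s.getD p ' '] :=
            pvOut_single s p (fun g => hcnd ⟨g.1, g.2.2.2.1, g.2.2.2.2⟩)
          have hstep : pvProc s (p + 1) ++ s.drop (p + 1) = pvProc s p ++ s.drop p := by
            rw [pvProc_succ, hout, List.append_assoc, List.singleton_append, ← hdropcons]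
          rw [← hstep]
          have hlen1 : (pvProc s (p + 1)).length = (pvProc s p).length + 1 := by
            rw [pvProc_succ, hout]; simp
          rw [show (pvProc s p).length + 2 + 1 = (pvProc s (p + 1)).length + 2 from by omega]
          exact ih f (by omega) (p + 1) (by omega) (by omega)
            (by rw [hstep]; simp only [List.length_append, List.length_drop] at hbud ⊢; omega)
      · rw [if_neg (by omega)]
        exact pvExit s p hp (by omega)

theorem pvA_char (s : List Char) :
    pvLoopA (s.length + s.count '\n') s 3 = pvProc s s.length := by
  cases hs0 : s with
  | nil => rfl
  | cons c r =>
    rw [← hs0]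
    have hn : 1 ≤ s.length := by rw [hs0]; simp
    have hproc1 : pvProc s 1 = [s.getD 0 ' '] := by
      unfold pvProc
      rw [show List.range 1 = [0] from rfl]
      simp [pvOut_single s 0 (fun g => by omega)]
    have hs : pvProc s 1 ++ s.drop 1 = s := by
      rw [hproc1]
      rw [hs0]
      simp [List.getD]
    have := pvLoopA_proc s (s.length + s.count '\n') 1 (le_refl 1) hn
      (by rw [hs, hproc1]; simp only [List.length_cons, List.length_nil]; omega)
    rw [hs, hproc1] at this
    simpa using this

-- ---- the final replace("\n", " ") is a character map ----
lemma pvReplGo : ∀ (fuel : Nat) (l acc : List Char), l.length ≤ fuel →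
    PySem.Chars.replace.go ['\n'] [' '] fuel l acc = acc.reverse ++ l.map pvNl2Sp := by
  intro fuel
  induction fuel with
  | zero =>
    intro l acc h
    have hl : l = [] := List.eq_nil_of_length_eq_zero (by omega)
    subst hl
    simp [PySem.Chars.replace.go]
  | succ fuel ih =>
    intro l acc h
    cases l with
    | nil => simp [PySem.Chars.replace.go]
    | cons c t =>
      rw [PySem.Chars.replace.go]
      by_cases hc : c = '\n'
      · subst hc
        rw [if_pos (by simp [List.isPrefixOf])]
        simp only [List.length_cons] at h
        rw [show List.drop ['\n'].length ('\n' :: t) = t from rfl]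
        rw [ih t _ (by omega)]
        simp [pvNl2Sp]
      · rw [if_neg (by simp [List.isPrefixOf]; exact fun hh => hc hh.symm)]
        simp only [List.length_cons] at h
        rw [ih t _ (by omega)]
        simp [pvNl2Sp, hc]

theorem pvReplace_char (t : List Char) :
    PySem.Chars.replace t ['\n'] [' '] = t.map pvNl2Sp := by
  unfold PySem.Chars.replace
  rw [if_neg (by simp)]
  rw [pvReplGo t.length t [] le_rfl]
  simp

-- ---- split('\n') as a structural recursion ----
def pvMySplit : List Char → List (List Char)
  | [] => [[]]
  | c :: r => if c = '\n' then [] :: pvMySplit r else (pvMySplit r).modifyHead (c :: ·)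

lemma pvMySplit_ne_nil (s : List Char) : pvMySplit s ≠ [] := by
  induction s with
  | nil => simp [pvMySplit]
  | cons c r ih =>
    unfold pvMySplit
    split
    · simp
    · cases h : pvMySplit r with
      | nil => exact absurd h ih
      | cons a l => simp [List.modifyHead]

lemma pvSplitGo : ∀ (fuel : Nat) (l cur : List Char) (acc : List (List Char)), l.length < fuel →
    PySem.Chars.splitOn.go ['\n'] fuel l cur acc
      = acc.reverse ++ (pvMySplit l).modifyHead (cur.reverse ++ ·) := by
  intro fuel
  induction fuel with
  | zero => intro l cur acc h; omega
  | succ fuel ih =>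
    intro l cur acc h
    cases l with
    | nil => simp [PySem.Chars.splitOn.go, pvMySplit, List.modifyHead]
    | cons c t =>
      rw [PySem.Chars.splitOn.go]
      simp only [List.length_cons] at h
      by_cases hc : c = '\n'
      · subst hc
        rw [if_pos (by simp [List.isPrefixOf])]
        rw [show List.drop ['\n'].length ('\n' :: t) = t from rfl]
        rw [ih t [] _ (by omega)]
        have hid : (pvMySplit t).modifyHead (List.reverse [] ++ ·) = pvMySplit t := by
          cases h2 : pvMySplit t with
          | nil => rfl
          | cons a l => simp [List.modifyHead]
        rw [hid]
        simp [pvMySplit, List.modifyHead]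
      · rw [if_neg (by simp [List.isPrefixOf]; exact fun hh => hc hh.symm)]
        rw [ih t (c :: cur) acc (by omega)]
        rw [show pvMySplit (c :: t) = (pvMySplit t).modifyHead (c :: ·) from by
          simp only [pvMySplit]; rw [if_neg hc]]
        cases h2 : pvMySplit t with
        | nil => exact absurd h2 (pvMySplit_ne_nil t)
        | cons a l => simp [List.modifyHead]

lemma pvSplitOn_eq (s : List Char) : PySem.Chars.splitOn s ['\n'] = pvMySplit s := by
  unfold PySem.Chars.splitOn
  rw [pvSplitGo (s.length + 1) s [] [] (by omega)]
  cases h : pvMySplit s with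
  | nil => exact absurd h (pvMySplit_ne_nil s)
  | cons a l => simp [List.modifyHead]

def pvGlue : List (List Char) → List Char
  | [] => []
  | [a] => a
  | a :: b :: r => a ++ '\n' :: pvGlue (b :: r)

lemma pvGlue_mySplit (s : List Char) : pvGlue (pvMySplit s) = s := by
  induction s with
  | nil => rfl
  | cons c r ih =>
    unfold pvMySplit
    by_cases hc : c = '\n'
    · rw [if_pos hc, hc]
      cases h : pvMySplit r with
      | nil => exact absurd h (pvMySplit_ne_nil r)
      | cons a l =>
        rw [h] at ih
        show pvGlue ([] :: a :: l) = '\n' :: r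
        rw [show pvGlue ([] :: a :: l) = [] ++ '\n' :: pvGlue (a :: l) from rfl]
        rw [ih]
        rfl
    · rw [if_neg hc]
      cases h : pvMySplit r with
      | nil => exact absurd h (pvMySplit_ne_nil r)
      | cons a l =>
        rw [h] at ih
        cases l with
        | nil =>
          show pvGlue [c :: a] = c :: r
          exact congrArg (c :: ·) ih
        | cons b l2 =>
          show (c :: a) ++ '\n' :: pvGlue (b :: l2) = c :: r
          rw [← ih]
          rfl

lemma pvMySplit_no_nl (s : List Char) : ∀ seg ∈ pvMySplit s, '\n' ∉ seg := by
  induction s with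
  | nil => intro seg hseg; simp [pvMySplit] at hseg; simp [hseg]
  | cons c r ih =>
    intro seg hseg
    unfold pvMySplit at hseg
    by_cases hc : c = '\n'
    · rw [if_pos hc] at hseg
      rcases List.mem_cons.mp hseg with h | h
      · simp [h]
      · exact ih seg h
    · rw [if_neg hc] at hseg
      cases h2 : pvMySplit r with
      | nil => exact absurd h2 (pvMySplit_ne_nil r)
      | cons a l =>
        rw [h2] at hseg
        simp only [List.modifyHead] at hseg
        rcases List.mem_cons.mp hseg with h | h
        · subst h
          intro hmem
          rcases List.mem_cons.mp hmem with h | h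
          · exact hc h.symm
          · exact ih a (by rw [h2]; simp) h
        · exact ih seg (by rw [h2]; simp [h])

lemma pvIntersperse_nil_flatten : ∀ (parts : List (List Char)),
    (List.intersperse ([] : List Char) parts).flatten = parts.flatten
  | [] => rfl
  | [a] => rfl
  | a :: b :: r => by
    show (a :: [] :: List.intersperse [] (b :: r)).flatten = (a :: b :: r).flatten
    simp only [List.flatten_cons]
    rw [show List.flatten (List.intersperse [] (b :: r)) = (b :: r).flatten from pvIntersperse_nil_flatten (b :: r)]
    simp

lemma pvJoin_nil (parts : List (List Char)) : PySem.Chars.join [] parts = parts.flatten := by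
  simp [PySem.Chars.join, List.intercalate, pvIntersperse_nil_flatten]

-- ---- B's separators and segments match pvOut position by position ----
lemma pvGetD_ne_of_not_mem (l : List Char) (j : Nat) (hj : j < l.length) (h : '\n' ∉ l) :
    l.getD j ' ' ≠ '\n' := by
  rw [List.getD_eq_getElem?_getD, List.getElem?_eq_getElem hj]
  intro he
  exact h (he ▸ List.getElem_mem hj)

lemma pvBody (s : List Char) (p k : Nat) (h : p + k ≤ s.length)
    (hfree : ∀ j, j < k → s.getD (p + j) ' ' ≠ '\n') :
    ((List.range' p k).flatMap (pvOut s)).map pvNl2Sp = (s.drop p).take k := by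
  rw [pvFlatMap_out_eq_map (s := s) (k := k) (p := p) (by
    intro q hq
    rw [List.mem_range'_1] at hq
    apply pvOut_single
    intro g
    have hq' : s.getD q ' ' ≠ '\n' := by
      have := hfree (q - p) (by omega)
      rwa [show p + (q - p) = q from by omega] at this
    exact hq' g.1)]
  rw [← pvMap_getD_range' s k p h, List.map_map]
  apply List.map_congr_left
  intro q hq
  rw [List.mem_range'_1] at hq
  have hq' : s.getD q ' ' ≠ '\n' := by
    have := hfree (q - p) (by omega)
    rwa [show p + (q - p) = q from by omega] at this
  simp only [Function.comp]
  unfold pvNl2Sp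
  rw [if_neg hq']

lemma pvSep (s : List Char) (pos : Nat) (nxt : List Char) (rest : List (List Char))
    (hnl : s.getD pos ' ' = '\n') (hdrop : s.drop (pos + 1) = pvGlue (nxt :: rest))
    (hfree : '\n' ∉ nxt) :
    (if pvDotB pos nxt (!rest.isEmpty) then ['.', ' '] else [' ']) = (pvOut s pos).map pvNl2Sp := by
  have hlen : s.length - (pos + 1) = (pvGlue (nxt :: rest)).length := by
    rw [← hdrop]; simp
  have hget : ∀ j : Nat, s.getD (pos + 1 + j) ' ' = (pvGlue (nxt :: rest)).getD j ' ' := by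
    intro j; rw [← hdrop, pvGetD_drop]
  have hupnl : PySem.Chars.isupper '\n' = false := by decide
  cases rest with
  | nil =>
    rw [show pvGlue [nxt] = nxt from rfl] at hlen hget
    cases nxt with
    | nil =>
      have hout : pvOut s pos = ['\n'] := by
        refine (pvOut_single s pos (fun g => absurd g.2.2.1 (by simp at hlen; omega))).trans ?_
        rw [hnl]
      rw [hout]
      simp [pvDotB, pvNl2Sp]
    | cons c t =>
      have hc : s.getD (pos + 1) ' ' = c := by have := hget 0; simpa using this
      cases t with
      | nil =>
        have hout : pvOut s pos = ['\n'] := by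
          refine (pvOut_single s pos (fun g => absurd g.2.2.1 (by simp at hlen; omega))).trans ?_
          rw [hnl]
        rw [hout]
        have hdot : pvDotB pos [c] (!(List.isEmpty ([] : List (List Char)))) = false := by
          simp [pvDotB]
        rw [hdot]
        simp [pvNl2Sp]
      | cons d t2 =>
        have hd : s.getD (pos + 2) ' ' = d := by
          have := hget 1; simpa [show pos + 1 + 1 = pos + 2 from rfl] using this
        have hn2 : pos + 2 < s.length := by simp at hlen; omega
        have he0 : s[pos]'(by omega) = '\n' := by
          rw [List.getD_eq_getElem?_getD, List.getElem?_eq_getElem (by omega : pos < s.length)] at hnl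
          simpa using hnl
        have he1 : s[pos + 1]'(by omega) = c := by
          rw [List.getD_eq_getElem?_getD, List.getElem?_eq_getElem (by omega : pos + 1 < s.length)] at hc
          simpa using hc
        have he2 : s[pos + 2]'hn2 = d := by
          rw [List.getD_eq_getElem?_getD, List.getElem?_eq_getElem hn2] at hd
          simpa using hd
        have hq0 := hnl; have hq1 := hc; have hq2 := hd
        simp only [List.getD_eq_getElem?_getD] at hq0 hq1 hq2
        unfold pvOut pvDotB
        by_cases h1 : 1 ≤ pos <;> by_cases h2 : PySem.Chars.isupper c = true <;>
          by_cases h3 : PySem.Chars.isupper d = true <;>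
          simp [h1, h2, h3, he0, he1, he2, hq0, hq1, hq2, hn2, pvNl2Sp]
  | cons nxt2 rest2 =>
    rw [show pvGlue (nxt :: nxt2 :: rest2) = nxt ++ '\n' :: pvGlue (nxt2 :: rest2) from rfl] at hlen hget
    cases nxt with
    | nil =>
      have hc : s.getD (pos + 1) ' ' = '\n' := by have := hget 0; simpa using this
      have hout : pvOut s pos = ['\n'] := by
        refine (pvOut_single s pos (fun g => ?_)).trans (by rw [hnl])
        have := g.2.2.2.1
        rw [hc, hupnl] at this
        exact Bool.false_ne_true this
      rw [hout]
      simp [pvDotB, pvNl2Sp]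
    | cons c t =>
      have hc : s.getD (pos + 1) ' ' = c := by have := hget 0; simpa using this
      cases t with
      | nil =>
        have hd : s.getD (pos + 2) ' ' = '\n' := by
          have := hget 1; simpa [show pos + 1 + 1 = pos + 2 from rfl] using this
        have hn2 : pos + 2 < s.length := by simp at hlen; omega
        have he0 : s[pos]'(by omega) = '\n' := by
          rw [List.getD_eq_getElem?_getD, List.getElem?_eq_getElem (by omega : pos < s.length)] at hnl
          simpa using hnl
        have he1 : s[pos + 1]'(by omega) = c := by
          rw [List.getD_eq_getElem?_getD, List.getElem?_eq_getElem (by omega : pos + 1 < s.length)] at hc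
          simpa using hc
        have he2 : s[pos + 2]'hn2 = '\n' := by
          rw [List.getD_eq_getElem?_getD, List.getElem?_eq_getElem hn2] at hd
          simpa using hd
        have hq0 := hnl; have hq1 := hc; have hq2 := hd
        simp only [List.getD_eq_getElem?_getD] at hq0 hq1 hq2
        unfold pvOut pvDotB
        by_cases h1 : 1 ≤ pos <;> by_cases h2 : PySem.Chars.isupper c = true <;>
          simp [h1, h2, he0, he1, he2, hq0, hq1, hq2, hn2, hupnl, pvNl2Sp]
      | cons d t2 =>
        have hd : s.getD (pos + 2) ' ' = d := by
          have := hget 1; simpa [show pos + 1 + 1 = pos + 2 from rfl] using this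
        have hn2 : pos + 2 < s.length := by simp at hlen; omega
        have he0 : s[pos]'(by omega) = '\n' := by
          rw [List.getD_eq_getElem?_getD, List.getElem?_eq_getElem (by omega : pos < s.length)] at hnl
          simpa using hnl
        have he1 : s[pos + 1]'(by omega) = c := by
          rw [List.getD_eq_getElem?_getD, List.getElem?_eq_getElem (by omega : pos + 1 < s.length)] at hc
          simpa using hc
        have he2 : s[pos + 2]'hn2 = d := by
          rw [List.getD_eq_getElem?_getD, List.getElem?_eq_getElem hn2] at hd
          simpa using hd
        have hq0 := hnl; have hq1 := hc; have hq2 := hd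
        simp only [List.getD_eq_getElem?_getD] at hq0 hq1 hq2
        unfold pvOut pvDotB
        by_cases h1 : 1 ≤ pos <;> by_cases h2 : PySem.Chars.isupper c = true <;>
          by_cases h3 : PySem.Chars.isupper d = true <;>
          simp [h1, h2, h3, he0, he1, he2, hq0, hq1, hq2, hn2, pvNl2Sp]

-- B's loop over the remaining segments computes the pvOut contributions from pos on
lemma pvLoopB_proc (s : List Char) : ∀ (rest : List (List Char)) (nxt : List Char) (pos : Nat),
    s.getD pos ' ' = '\n' → pos < s.length → s.drop (pos + 1) = pvGlue (nxt :: rest) →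
    '\n' ∉ nxt → (∀ seg ∈ rest, '\n' ∉ seg) →
    (pvLoopB pos (nxt :: rest)).flatten
      = ((List.range' pos (s.length - pos)).flatMap (pvOut s)).map pvNl2Sp := by
  intro rest
  induction rest with
  | nil =>
    intro nxt pos hnl hlt hdrop hfree _
    have hdrop' : s.drop (pos + 1) = nxt := hdrop
    have hlen : s.length - (pos + 1) = nxt.length := by rw [← hdrop']; simp
    have hfree' : ∀ j, j < nxt.length → s.getD (pos + 1 + j) ' ' ≠ '\n' := by
      intro j hj
      have he : s.getD (pos + 1 + j) ' ' = nxt.getD j ' ' := by rw [← hdrop', pvGetD_drop]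
      rw [he]
      exact pvGetD_ne_of_not_mem nxt j hj hfree
    rw [show s.length - pos = nxt.length + 1 from by omega, List.range'_succ]
    rw [List.flatMap_cons, List.map_append]
    simp only [pvLoopB, List.flatten_cons, List.flatten_nil, List.append_nil]
    rw [← pvSep s pos nxt [] hnl hdrop hfree]
    congr 1
    rw [pvBody s (pos + 1) nxt.length (by omega) hfree', hdrop', List.take_length]
  | cons nxt2 rest2 ih =>
    intro nxt pos hnl hlt hdrop hfree hfree2
    have hdrop' : s.drop (pos + 1) = nxt ++ '\n' :: pvGlue (nxt2 :: rest2) := hdrop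
    have hlen : s.length - (pos + 1) = nxt.length + 1 + (pvGlue (nxt2 :: rest2)).length := by
      rw [← List.length_drop, hdrop']
      simp
      omega
    have hget : ∀ j : Nat, s.getD (pos + 1 + j) ' '
        = (nxt ++ '\n' :: pvGlue (nxt2 :: rest2)).getD j ' ' := by
      intro j; rw [← hdrop', pvGetD_drop]
    have hfree' : ∀ j, j < nxt.length → s.getD (pos + 1 + j) ' ' ≠ '\n' := by
      intro j hj
      rw [hget j, List.getD_eq_getElem?_getD, List.getElem?_append_left (by omega),
        ← List.getD_eq_getElem?_getD]
      exact pvGetD_ne_of_not_mem nxt j hj hfree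
    have hnl2 : s.getD (pos + 1 + nxt.length) ' ' = '\n' := by
      rw [hget nxt.length]
      have := pvGetD_append_len nxt ('\n' :: pvGlue (nxt2 :: rest2)) 0 ' '
      simpa using this
    have hlt2 : pos + 1 + nxt.length < s.length := by omega
    have hdrop2 : s.drop (pos + 1 + nxt.length + 1) = pvGlue (nxt2 :: rest2) := by
      rw [show pos + 1 + nxt.length + 1 = (pos + 1) + (nxt.length + 1) from by omega]
      rw [← List.drop_drop, hdrop', List.drop_append]
      simp
    -- split the position range: the newline at pos, the chars of nxt, the rest
    rw [show s.length - pos = (1 + nxt.length) + (s.length - (pos + 1 + nxt.length)) from by omega]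
    rw [← List.range'_append (s := pos) (m := 1 + nxt.length)
      (n := s.length - (pos + 1 + nxt.length)) (step := 1)]
    rw [show pos + 1 * (1 + nxt.length) = pos + 1 + nxt.length from by omega]
    rw [show (1 + nxt.length) = nxt.length + 1 from by omega, List.range'_succ]
    rw [List.flatMap_append, List.flatMap_cons, List.map_append, List.map_append]
    simp only [pvLoopB, List.flatten_cons]
    rw [← List.append_assoc]
    rw [← pvSep s pos nxt (nxt2 :: rest2) hnl hdrop hfree]
    congr 1
    · congr 1
      rw [pvBody s (pos + 1) nxt.length (by omega) hfree']
      rw [hdrop', List.take_left]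
    · exact ih nxt2 (pos + 1 + nxt.length) hnl2 hlt2 hdrop2
        (hfree2 nxt2 (by simp)) (fun seg hseg => hfree2 seg (by simp [hseg]))

theorem pvB_char (s : List Char) :
    PySem.Chars.join []
        ((PySem.Chars.splitOn s ['\n']).headD [] ::
          pvLoopB ((PySem.Chars.splitOn s ['\n']).headD []).length (PySem.Chars.splitOn s ['\n']).tail)
      = (pvProc s s.length).map pvNl2Sp := by
  rw [pvSplitOn_eq, pvJoin_nil]
  cases h : pvMySplit s with
  | nil => exact absurd h (pvMySplit_ne_nil s)
  | cons seg0 rest =>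
    have hglue : pvGlue (seg0 :: rest) = s := by rw [← h]; exact pvGlue_mySplit s
    have hfreeAll := pvMySplit_no_nl s
    rw [h] at hfreeAll
    simp only [List.headD_cons, List.tail_cons, List.flatten_cons]
    cases rest with
    | nil =>
      have hs : seg0 = s := hglue
      subst hs
      have hpre : ((List.range' 0 seg0.length).flatMap (pvOut seg0)).map pvNl2Sp = seg0 := by
        rw [pvBody seg0 0 seg0.length (by omega) (by
          intro j hj
          simp only [Nat.zero_add]
          exact pvGetD_ne_of_not_mem seg0 j hj (hfreeAll seg0 (by simp)))]
        simp
      unfold pvProc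
      rw [List.range_eq_range', hpre]
      simp [pvLoopB]
    | cons nxt rest2 =>
      have hsplit : seg0 ++ '\n' :: pvGlue (nxt :: rest2) = s := hglue
      have hlen0 : seg0.length < s.length := by
        rw [← hsplit]
        simp only [List.length_append, List.length_cons]
        omega
      have hnl : s.getD seg0.length ' ' = '\n' := by
        rw [← hsplit]
        have := pvGetD_append_len seg0 ('\n' :: pvGlue (nxt :: rest2)) 0 ' '
        simpa using this
      have hdrop : s.drop (seg0.length + 1) = pvGlue (nxt :: rest2) := by
        rw [← hsplit, List.drop_append]
        simp
      have hpre : ((List.range' 0 seg0.length).flatMap (pvOut s)).map pvNl2Sp = seg0 := by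
        rw [pvBody s 0 seg0.length (by omega) (by
          intro j hj
          simp only [Nat.zero_add]
          have he : s.getD j ' ' = seg0.getD j ' ' := by
            rw [← hsplit, List.getD_eq_getElem?_getD, List.getElem?_append_left (by omega),
              ← List.getD_eq_getElem?_getD]
          rw [he]
          exact pvGetD_ne_of_not_mem seg0 j hj (hfreeAll seg0 (by simp)))]
        rw [List.drop_zero, ← hsplit, List.take_left' rfl]
      unfold pvProc
      rw [pvProc_split s seg0.length s.length (le_of_lt hlen0)]
      rw [List.map_append, List.range_eq_range', hpre]
      congr 1
      exact pvLoopB_proc s rest2 nxt seg0.length hnl hlen0 hdrop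
        (hfreeAll nxt (by simp)) (fun seg hseg => hfreeAll seg (by simp [hseg]))

-- ===== VERDICT (by name: the statement is the Claim_ definition above) =====
theorem line_break_processing_py_spec : Claim_equal_line_break_processing_py := by
  intro text _
  unfold Spec_line_break_processing_py line_break_processing_py line_break_processing_py_alt
  rw [pvA_char, pvReplace_char]
  exact (congrArg String.ofList (pvB_char text.toList)).symm
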